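-- pv_equiv track=rewrite | github.com/sanketexe/ai-cloud-scheduler | backend/core/ai_orchestrator.py | _are_actions_conflicting
-- ===== SOURCE A (Python) =====
-- def _are_actions_conflicting(action1: str, action2: str) -> bool:
--     """Check if two actions conflict with each other"""
--     conflicting_pairs = [
--         ("scale_up", "scale_down"),
--         ("migrate_workload", "optimize_configuration"),
--         ("increase_capacity", "reduce_capacity")
--     ]
--
--     for pair in conflicting_pairs:
--         if (action1 in pair and action2 in pair) and action1 != action2:
--             return True
--
--     return False
-- ===== SOURCE B (Python) =====
-- _CONFLICTS = {
--     ("increase_capacity", "reduce_capacity"),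
--     ("migrate_workload", "optimize_configuration"),
--     ("scale_down", "scale_up"),
-- }
--
-- def _are_actions_conflicting(action1: str, action2: str) -> bool:
--     """Check if two actions conflict with each other"""
--     lo, hi = sorted((action1, action2))
--     return (lo, hi) in _CONFLICTS
-- ===== Notes on version B (the rewrite author's own statement) =====
-- stated objective: idiomatic
-- what changed: B canonicalises the unordered pair by sorting the two action strings and does a single membership test in a set of canonical (sorted) conflict pairs, eliminating A's scan over pairs and its explicit inequality guard (equal actions yield a pair like (x,x), which is never canonical).
import Mathlib
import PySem

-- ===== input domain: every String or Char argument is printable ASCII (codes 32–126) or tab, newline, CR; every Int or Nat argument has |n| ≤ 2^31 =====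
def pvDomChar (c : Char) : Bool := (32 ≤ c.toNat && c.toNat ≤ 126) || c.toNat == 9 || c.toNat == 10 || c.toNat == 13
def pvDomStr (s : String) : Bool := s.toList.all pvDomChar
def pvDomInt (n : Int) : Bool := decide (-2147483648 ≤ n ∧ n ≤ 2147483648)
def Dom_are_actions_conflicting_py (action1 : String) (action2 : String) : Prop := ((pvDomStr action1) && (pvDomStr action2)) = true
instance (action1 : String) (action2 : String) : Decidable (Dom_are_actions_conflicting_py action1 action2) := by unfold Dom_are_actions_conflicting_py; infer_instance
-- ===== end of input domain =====

-- B canonicalises the unordered pair by sorting the two strings and tests one membership in a set of canonical conflict pairs (idiomatic; equal actions never match because a canonical pair has distinct components).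


-- ===== PORT A =====
def pvConflictPairs : List (String × String) :=
  [("scale_up", "scale_down"),
   ("migrate_workload", "optimize_configuration"),
   ("increase_capacity", "reduce_capacity")]

-- 'a in pair' for a 2-tuple
def pvInPair (a : String) (p : String × String) : Bool := a == p.1 || a == p.2

-- the 'for pair in conflicting_pairs' loop with early return True
def pvLoopA (a1 a2 : String) : List (String × String) → Bool
  | [] => false
  | p :: rest =>
      if (pvInPair a1 p && pvInPair a2 p) && a1 != a2 then true
      else pvLoopA a1 a2 rest

def are_actions_conflicting_py (action1 : String) (action2 : String) : Bool :=
  pvLoopA action1 action2 pvConflictPairs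

-- ===== PORT B =====
def pvConflicts : PySem.Set (String × String) :=
  PySem.Set.ofList
    [("increase_capacity", "reduce_capacity"),
     ("migrate_workload", "optimize_configuration"),
     ("scale_down", "scale_up")]

-- lo, hi = sorted((action1, action2)); return (lo, hi) in _CONFLICTS
def are_actions_conflicting_py_alt (action1 : String) (action2 : String) : Bool :=
  let lohi := if action2 < action1 then (action2, action1) else (action1, action2)
  PySem.Set.contains pvConflicts lohi

-- ===== PRECONDITION & SPEC =====
def Spec_are_actions_conflicting_py (action1 : String) (action2 : String) (out : Bool) : Prop := out = are_actions_conflicting_py_alt action1 action2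
instance (action1 : String) (action2 : String) (out : Bool) : Decidable (Spec_are_actions_conflicting_py action1 action2 out) := by unfold Spec_are_actions_conflicting_py; infer_instance

-- ===== CLAIM (what is proved, stated in full; the proofs are below) =====
def Claim_equal_are_actions_conflicting_py : Prop := ∀ (action1 : String) (action2 : String), Dom_are_actions_conflicting_py action1 action2 → Spec_are_actions_conflicting_py action1 action2 (are_actions_conflicting_py action1 action2)

-- ===== LEMMAS AND PROOFS =====
theorem pv_ab_eq (a1 a2 : String) :
    are_actions_conflicting_py a1 a2 = are_actions_conflicting_py_alt a1 a2 := by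
  by_cases h0 : a1 = "scale_up"
  · subst h0
    by_cases g1 : a2 = "scale_up"
    · subst g1
      simp [are_actions_conflicting_py, pvLoopA, pvInPair, pvConflictPairs,
        are_actions_conflicting_py_alt, pvConflicts, PySem.Set.ofList, PySem.Set.add,
        PySem.Set.empty, PySem.Set.contains]
    by_cases g2 : a2 = "scale_down"
    · subst g2
      simp [are_actions_conflicting_py, pvLoopA, pvInPair, pvConflictPairs,
        are_actions_conflicting_py_alt, pvConflicts, PySem.Set.ofList, PySem.Set.add,
        PySem.Set.empty, PySem.Set.contains]
      decide
    · simp_all [are_actions_conflicting_py, pvLoopA, pvInPair, pvConflictPairs,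
        are_actions_conflicting_py_alt, pvConflicts, PySem.Set.ofList, PySem.Set.add,
        PySem.Set.empty, PySem.Set.contains]
      split_ifs <;> simp_all
  by_cases h1 : a1 = "scale_down"
  · subst h1
    by_cases g1 : a2 = "scale_down"
    · subst g1
      simp [are_actions_conflicting_py, pvLoopA, pvInPair, pvConflictPairs,
        are_actions_conflicting_py_alt, pvConflicts, PySem.Set.ofList, PySem.Set.add,
        PySem.Set.empty, PySem.Set.contains]
    by_cases g2 : a2 = "scale_up"
    · subst g2
      simp [are_actions_conflicting_py, pvLoopA, pvInPair, pvConflictPairs,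
        are_actions_conflicting_py_alt, pvConflicts, PySem.Set.ofList, PySem.Set.add,
        PySem.Set.empty, PySem.Set.contains]
      decide
    · simp_all [are_actions_conflicting_py, pvLoopA, pvInPair, pvConflictPairs,
        are_actions_conflicting_py_alt, pvConflicts, PySem.Set.ofList, PySem.Set.add,
        PySem.Set.empty, PySem.Set.contains]
      split_ifs <;> simp_all
  by_cases h2 : a1 = "migrate_workload"
  · subst h2
    by_cases g1 : a2 = "migrate_workload"
    · subst g1
      simp [are_actions_conflicting_py, pvLoopA, pvInPair, pvConflictPairs,
        are_actions_conflicting_py_alt, pvConflicts, PySem.Set.ofList, PySem.Set.add,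
        PySem.Set.empty, PySem.Set.contains]
    by_cases g2 : a2 = "optimize_configuration"
    · subst g2
      simp [are_actions_conflicting_py, pvLoopA, pvInPair, pvConflictPairs,
        are_actions_conflicting_py_alt, pvConflicts, PySem.Set.ofList, PySem.Set.add,
        PySem.Set.empty, PySem.Set.contains]
      decide
    · simp_all [are_actions_conflicting_py, pvLoopA, pvInPair, pvConflictPairs,
        are_actions_conflicting_py_alt, pvConflicts, PySem.Set.ofList, PySem.Set.add,
        PySem.Set.empty, PySem.Set.contains]
      split_ifs <;> simp_all
  by_cases h3 : a1 = "optimize_configuration"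
  · subst h3
    by_cases g1 : a2 = "optimize_configuration"
    · subst g1
      simp [are_actions_conflicting_py, pvLoopA, pvInPair, pvConflictPairs,
        are_actions_conflicting_py_alt, pvConflicts, PySem.Set.ofList, PySem.Set.add,
        PySem.Set.empty, PySem.Set.contains]
    by_cases g2 : a2 = "migrate_workload"
    · subst g2
      simp [are_actions_conflicting_py, pvLoopA, pvInPair, pvConflictPairs,
        are_actions_conflicting_py_alt, pvConflicts, PySem.Set.ofList, PySem.Set.add,
        PySem.Set.empty, PySem.Set.contains]
      decide
    · simp_all [are_actions_conflicting_py, pvLoopA, pvInPair, pvConflictPairs,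
        are_actions_conflicting_py_alt, pvConflicts, PySem.Set.ofList, PySem.Set.add,
        PySem.Set.empty, PySem.Set.contains]
      split_ifs <;> simp_all
  by_cases h4 : a1 = "increase_capacity"
  · subst h4
    by_cases g1 : a2 = "increase_capacity"
    · subst g1
      simp [are_actions_conflicting_py, pvLoopA, pvInPair, pvConflictPairs,
        are_actions_conflicting_py_alt, pvConflicts, PySem.Set.ofList, PySem.Set.add,
        PySem.Set.empty, PySem.Set.contains]
    by_cases g2 : a2 = "reduce_capacity"
    · subst g2
      simp [are_actions_conflicting_py, pvLoopA, pvInPair, pvConflictPairs,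
        are_actions_conflicting_py_alt, pvConflicts, PySem.Set.ofList, PySem.Set.add,
        PySem.Set.empty, PySem.Set.contains]
      decide
    · simp_all [are_actions_conflicting_py, pvLoopA, pvInPair, pvConflictPairs,
        are_actions_conflicting_py_alt, pvConflicts, PySem.Set.ofList, PySem.Set.add,
        PySem.Set.empty, PySem.Set.contains]
      split_ifs <;> simp_all
  by_cases h5 : a1 = "reduce_capacity"
  · subst h5
    by_cases g1 : a2 = "reduce_capacity"
    · subst g1
      simp [are_actions_conflicting_py, pvLoopA, pvInPair, pvConflictPairs,
        are_actions_conflicting_py_alt, pvConflicts, PySem.Set.ofList, PySem.Set.add,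
        PySem.Set.empty, PySem.Set.contains]
    by_cases g2 : a2 = "increase_capacity"
    · subst g2
      simp [are_actions_conflicting_py, pvLoopA, pvInPair, pvConflictPairs,
        are_actions_conflicting_py_alt, pvConflicts, PySem.Set.ofList, PySem.Set.add,
        PySem.Set.empty, PySem.Set.contains]
      decide
    · simp_all [are_actions_conflicting_py, pvLoopA, pvInPair, pvConflictPairs,
        are_actions_conflicting_py_alt, pvConflicts, PySem.Set.ofList, PySem.Set.add,
        PySem.Set.empty, PySem.Set.contains]
      split_ifs <;> simp_all
  · simp_all [are_actions_conflicting_py, pvLoopA, pvInPair, pvConflictPairs,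
      are_actions_conflicting_py_alt, pvConflicts, PySem.Set.ofList, PySem.Set.add,
      PySem.Set.empty, PySem.Set.contains]
    split_ifs <;> simp_all

-- ===== VERDICT (by name: the statement is the Claim_ definition above) =====
theorem are_actions_conflicting_py_spec : Claim_equal_are_actions_conflicting_py := by
  intro a1 a2 _
  unfold Spec_are_actions_conflicting_py
  exact pv_ab_eq a1 a2
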